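-- pv_equiv track=rewrite | github.com/Marksio90/Narrative_OS | backend/services/draft/service.py | _parse_extracted_facts
-- ===== SOURCE A (Python) =====
-- from typing import Dict, Any, Optional, List
--
-- def _parse_extracted_facts(response: str) -> Dict[str, Any]:
--     """Parse extracted facts from LLM response"""
--     facts = {
--         "character": [],
--         "location": [],
--         "item": [],
--         "relationship": [],
--     }
--
--     current_fact = {}
--     lines = response.strip().split("\n")
--
--     for line in lines:
--         line = line.strip()
--
--         if line.startswith("CATEGORY:"):
--             current_fact["category"] = line.split(":", 1)[1].strip().lower()
--
--         elif line.startswith("ENTITY:"):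
--             current_fact["entity"] = line.split(":", 1)[1].strip()
--
--         elif line.startswith("FACT:"):
--             current_fact["fact"] = line.split(":", 1)[1].strip()
--
--         elif line == "---" and current_fact:
--             category = current_fact.get("category", "character")
--             if category in facts:
--                 facts[category].append({
--                     "entity": current_fact.get("entity"),
--                     "fact": current_fact.get("fact"),
--                 })
--             current_fact = {}
--
--     return facts
-- ===== SOURCE B (Python) =====
-- def _parse_extracted_facts(response: str):
--     """Parse extracted facts from LLM response (record-oriented two-phase parse)."""
--     # Phase 1: group stripped lines into records terminated by '---';
--     # a trailing unterminated group is dropped.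
--     records = []
--     buf = []
--     for raw in response.strip().split("\n"):
--         line = raw.strip()
--         if line == "---":
--             records.append(buf)
--             buf = []
--         else:
--             buf.append(line)
--     # Phase 2: reduce each record to its last-seen fields and bucket it.
--     buckets = {"character": [], "location": [], "item": [], "relationship": []}
--     for rec in records:
--         cat = ent = fct = None
--         for line in rec:
--             if line.startswith("CATEGORY:"):
--                 cat = line.split(":", 1)[1].strip().lower()
--             elif line.startswith("ENTITY:"):
--                 ent = line.split(":", 1)[1].strip()
--             elif line.startswith("FACT:"):
--                 fct = line.split(":", 1)[1].strip()
--         if cat is None and ent is None and fct is None: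
--             continue
--         key = "character" if cat is None else cat
--         if key in buckets:
--             buckets[key].append({"entity": ent, "fact": fct})
--     return buckets
-- ===== Notes on version B (the rewrite author's own statement) =====
-- stated objective: alternative
-- what changed: B replaces A's single pass with a mutable current_fact dict by a two-phase record parse: first group stripped lines into separator-terminated records (dropping the trailing unterminated one), then reduce each record to its last-seen category/entity/fact fields and bucket it.
import Mathlib
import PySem

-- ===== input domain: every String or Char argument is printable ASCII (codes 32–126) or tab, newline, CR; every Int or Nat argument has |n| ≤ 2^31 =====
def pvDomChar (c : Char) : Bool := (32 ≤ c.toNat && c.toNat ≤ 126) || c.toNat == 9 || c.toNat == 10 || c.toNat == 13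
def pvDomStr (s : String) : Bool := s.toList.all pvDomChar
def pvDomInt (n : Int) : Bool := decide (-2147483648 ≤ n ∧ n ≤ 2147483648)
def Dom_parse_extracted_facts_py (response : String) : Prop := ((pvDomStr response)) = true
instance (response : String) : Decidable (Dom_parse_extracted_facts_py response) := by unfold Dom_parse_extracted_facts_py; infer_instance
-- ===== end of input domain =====

-- B re-parses the text as '---'-terminated records in two phases (group, then reduce each record)
-- instead of A's single pass with a mutable current_fact dict; objective: alternative decomposition, same cost.

-- shared helper: line.split(":", 1)[1] — exact whenever line contains ':',
-- which the CATEGORY:/ENTITY:/FACT: startswith guards ensure at every use site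
def pvAfterColon (line : String) : String :=
  match PySem.Str.splitMax? line ":" 1 with
  | some (_ :: rest :: _) => rest
  | _ => ""

-- ===== PORT A =====
-- single pass: state = (facts dict, current_fact dict)
def pvStepA (st : PySem.Dict String (List (List (String × Option String))) × PySem.Dict String String)
    (line0 : String) :
    PySem.Dict String (List (List (String × Option String))) × PySem.Dict String String :=
  let line := PySem.Str.strip line0
  if PySem.Str.startswith line "CATEGORY:" then
    (st.1, st.2.insert "category" (PySem.Str.lower (PySem.Str.strip (pvAfterColon line))))
  else if PySem.Str.startswith line "ENTITY:" then
    (st.1, st.2.insert "entity" (PySem.Str.strip (pvAfterColon line)))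
  else if PySem.Str.startswith line "FACT:" then
    (st.1, st.2.insert "fact" (PySem.Str.strip (pvAfterColon line)))
  else if line == "---" && !(st.2.size == 0) then
    let category := st.2.getD "category" "character"
    let facts' :=
      if st.1.contains category then
        st.1.modify category [] (· ++ [[("entity", st.2.get? "entity"), ("fact", st.2.get? "fact")]])
      else st.1
    (facts', PySem.Dict.empty)
  else st

def parse_extracted_facts_py (response : String) : List (String × List (List (String × Option String))) :=
  let facts : PySem.Dict String (List (List (String × Option String))) :=
    PySem.Dict.ofList [("character", []), ("location", []), ("item", []), ("relationship", [])]
  -- response.strip().split("\n"): split? is some since the separator "\n" is non-empty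
  let lines := (PySem.Str.split? (PySem.Str.strip response) "\n").getD []
  (lines.foldl pvStepA (facts, PySem.Dict.empty)).1.items

-- ===== PORT B =====
-- phase-2 inner loop: fold a record's lines down to its last-seen (category, entity, fact)
def pvUpdF (f : Option String × Option String × Option String) (line : String) :
    Option String × Option String × Option String :=
  if PySem.Str.startswith line "CATEGORY:" then
    (some (PySem.Str.lower (PySem.Str.strip (pvAfterColon line))), f.2.1, f.2.2)
  else if PySem.Str.startswith line "ENTITY:" then
    (f.1, some (PySem.Str.strip (pvAfterColon line)), f.2.2)
  else if PySem.Str.startswith line "FACT:" then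
    (f.1, f.2.1, some (PySem.Str.strip (pvAfterColon line)))
  else f

-- phase-2 tail of the record loop: guard, default category, bucket dispatch
def pvFlush
    (b : List (List (String × Option String)) × List (List (String × Option String)) ×
         List (List (String × Option String)) × List (List (String × Option String)))
    (f : Option String × Option String × Option String) :
    List (List (String × Option String)) × List (List (String × Option String)) ×
    List (List (String × Option String)) × List (List (String × Option String)) :=
  if f.1 = none ∧ f.2.1 = none ∧ f.2.2 = none then b
  else
    let key := f.1.getD "character"
    let entry : List (String × Option String) := [("entity", f.2.1), ("fact", f.2.2)]
    if key == "character" then (b.1 ++ [entry], b.2.1, b.2.2.1, b.2.2.2)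
    else if key == "location" then (b.1, b.2.1 ++ [entry], b.2.2.1, b.2.2.2)
    else if key == "item" then (b.1, b.2.1, b.2.2.1 ++ [entry], b.2.2.2)
    else if key == "relationship" then (b.1, b.2.1, b.2.2.1, b.2.2.2 ++ [entry])
    else b

-- phase-1 loop body: append a finished record at '---', otherwise grow the open one
def pvSplitStep (st : List (List String) × List String) (raw : String) :
    List (List String) × List String :=
  let line := PySem.Str.strip raw
  if line == "---" then (st.1 ++ [st.2], []) else (st.1, st.2 ++ [line])

-- phase-2 loop body: reduce one record to its fields and bucket it
def pvBucket
    (b : List (List (String × Option String)) × List (List (String × Option String)) ×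
         List (List (String × Option String)) × List (List (String × Option String)))
    (rec : List String) :
    List (List (String × Option String)) × List (List (String × Option String)) ×
    List (List (String × Option String)) × List (List (String × Option String)) :=
  pvFlush b (rec.foldl pvUpdF (none, none, none))

def parse_extracted_facts_py_alt (response : String) : List (String × List (List (String × Option String))) :=
  -- phase 1: group stripped lines into '---'-terminated records; the trailing open group is dropped
  let split := ((PySem.Str.split? (PySem.Str.strip response) "\n").getD []).foldl
    pvSplitStep ([], [])
  -- phase 2: reduce each record and bucket it
  let b := split.1.foldl pvBucket ([], [], [], [])
  [("character", b.1), ("location", b.2.1), ("item", b.2.2.1), ("relationship", b.2.2.2)]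

-- ===== PRECONDITION & SPEC =====
def Spec_parse_extracted_facts_py (response : String) (out : List (String × List (List (String × Option String)))) : Prop := out = parse_extracted_facts_py_alt response
instance (response : String) (out : List (String × List (List (String × Option String)))) : Decidable (Spec_parse_extracted_facts_py response out) := by unfold Spec_parse_extracted_facts_py; infer_instance

-- ===== CLAIM (what is proved, stated in full; the proofs are below) =====
def Claim_equal_parse_extracted_facts_py : Prop := ∀ (response : String), Dom_parse_extracted_facts_py response → Spec_parse_extracted_facts_py response (parse_extracted_facts_py response)

-- ===== LEMMAS AND PROOFS =====

-- reference single pass over already-stripped lines, used to meet both ports in the middle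
def pvSpecRun : List String →
    (List (List (String × Option String)) × List (List (String × Option String)) ×
     List (List (String × Option String)) × List (List (String × Option String))) →
    (Option String × Option String × Option String) →
    (List (List (String × Option String)) × List (List (String × Option String)) ×
     List (List (String × Option String)) × List (List (String × Option String)))
  | [], b, _ => b
  | ln :: rest, b, f =>
    if ln == "---" then pvSpecRun rest (pvFlush b f) (none, none, none)
    else pvSpecRun rest b (pvUpdF f ln)

def pvFactsOf
    (b : List (List (String × Option String)) × List (List (String × Option String)) ×
         List (List (String × Option String)) × List (List (String × Option String))) :
    PySem.Dict String (List (List (String × Option String))) :=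
  PySem.Dict.mk [("character", b.1), ("location", b.2.1), ("item", b.2.2.1), ("relationship", b.2.2.2)]

-- invariant tying A's current_fact dict to the reference field triple
def pvR (cf : PySem.Dict String String) (f : Option String × Option String × Option String) : Prop :=
  cf.get? "category" = f.1 ∧ cf.get? "entity" = f.2.1 ∧ cf.get? "fact" = f.2.2 ∧
    (cf.size = 0 ↔ f = (none, none, none))


lemma pvInsert_size_ne_zero (d : PySem.Dict String String) (k v : String) :
    (d.insert k v).size ≠ 0 := by
  intro h
  have h1 := PySem.Dict.get?_insert_self (d := d) (k := k) (v := v)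
  rcases hd : (d.insert k v) with ⟨items⟩
  rw [hd] at h h1
  cases items with
  | nil => simp [PySem.Dict.get?] at h1
  | cons a t => simp [PySem.Dict.size] at h

-- a line with one of the field prefixes is not the separator
lemma pvNotSep (s p : String) (h : PySem.Str.startswith s p = true)
    (hp : PySem.Str.startswith "---" p = false) : (s == "---") = false := by
  refine beq_eq_false_iff_ne.mpr (fun hEq => ?_)
  subst hEq
  rw [hp] at h
  exact Bool.noConfusion h

lemma pvA_run (l : List String) :
    ∀ b cf f, pvR cf f →
      (l.foldl pvStepA (pvFactsOf b, cf)).1 = pvFactsOf (pvSpecRun (l.map PySem.Str.strip) b f) := by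
  induction l with
  | nil => intro b cf f _; rfl
  | cons ln rest ih =>
    intro b cf f hR
    obtain ⟨h1, h2, h3, h4⟩ := hR
    simp only [List.foldl_cons, List.map_cons]
    by_cases hc : PySem.Str.startswith (PySem.Str.strip ln) "CATEGORY:" = true
    · have hsep := pvNotSep _ _ hc (by decide)
      have eA : pvStepA (pvFactsOf b, cf) ln =
          (pvFactsOf b, cf.insert "category"
            (PySem.Str.lower (PySem.Str.strip (pvAfterColon (PySem.Str.strip ln))))) := by
        simp only [pvStepA]; rw [if_pos hc]
      have eS : pvSpecRun (PySem.Str.strip ln :: rest.map PySem.Str.strip) b f =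
          pvSpecRun (rest.map PySem.Str.strip) b (pvUpdF f (PySem.Str.strip ln)) := by
        simp only [pvSpecRun]; rw [if_neg (by simp [hsep])]
      have eU : pvUpdF f (PySem.Str.strip ln) =
          (some (PySem.Str.lower (PySem.Str.strip (pvAfterColon (PySem.Str.strip ln)))), f.2.1, f.2.2) := by
        simp only [pvUpdF]; rw [if_pos hc]
      rw [eA, eS, eU]
      exact ih b _ _ ⟨by simp, by simp [PySem.Dict.get?_insert, h2],
        by simp [PySem.Dict.get?_insert, h3],
        iff_of_false (pvInsert_size_ne_zero _ _ _) (by simp)⟩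
    · by_cases he : PySem.Str.startswith (PySem.Str.strip ln) "ENTITY:" = true
      · have hsep := pvNotSep _ _ he (by decide)
        have eA : pvStepA (pvFactsOf b, cf) ln =
            (pvFactsOf b, cf.insert "entity" (PySem.Str.strip (pvAfterColon (PySem.Str.strip ln)))) := by
          simp only [pvStepA]; rw [if_neg hc, if_pos he]
        have eS : pvSpecRun (PySem.Str.strip ln :: rest.map PySem.Str.strip) b f =
            pvSpecRun (rest.map PySem.Str.strip) b (pvUpdF f (PySem.Str.strip ln)) := by
          simp only [pvSpecRun]; rw [if_neg (by simp [hsep])]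
        have eU : pvUpdF f (PySem.Str.strip ln) =
            (f.1, some (PySem.Str.strip (pvAfterColon (PySem.Str.strip ln))), f.2.2) := by
          simp only [pvUpdF]; rw [if_neg hc, if_pos he]
        rw [eA, eS, eU]
        exact ih b _ _ ⟨by simp [PySem.Dict.get?_insert, h1], by simp,
          by simp [PySem.Dict.get?_insert, h3],
          iff_of_false (pvInsert_size_ne_zero _ _ _) (by simp)⟩
      · by_cases hf : PySem.Str.startswith (PySem.Str.strip ln) "FACT:" = true
        · have hsep := pvNotSep _ _ hf (by decide)
          have eA : pvStepA (pvFactsOf b, cf) ln =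
              (pvFactsOf b, cf.insert "fact" (PySem.Str.strip (pvAfterColon (PySem.Str.strip ln)))) := by
            simp only [pvStepA]; rw [if_neg hc, if_neg he, if_pos hf]
          have eS : pvSpecRun (PySem.Str.strip ln :: rest.map PySem.Str.strip) b f =
              pvSpecRun (rest.map PySem.Str.strip) b (pvUpdF f (PySem.Str.strip ln)) := by
            simp only [pvSpecRun]; rw [if_neg (by simp [hsep])]
          have eU : pvUpdF f (PySem.Str.strip ln) =
              (f.1, f.2.1, some (PySem.Str.strip (pvAfterColon (PySem.Str.strip ln)))) := by
            simp only [pvUpdF]; rw [if_neg hc, if_neg he, if_pos hf]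
          rw [eA, eS, eU]
          exact ih b _ _ ⟨by simp [PySem.Dict.get?_insert, h1], by simp [PySem.Dict.get?_insert, h2],
            by simp,
            iff_of_false (pvInsert_size_ne_zero _ _ _) (by simp)⟩
        · by_cases hsep : (PySem.Str.strip ln == "---") = true
          · have eS : pvSpecRun (PySem.Str.strip ln :: rest.map PySem.Str.strip) b f =
                pvSpecRun (rest.map PySem.Str.strip) (pvFlush b f) (none, none, none) := by
              simp only [pvSpecRun]; rw [if_pos hsep]
            by_cases hz : cf.size = 0
            · have hfn : f = (none, none, none) := h4.mp hz
              have eA : pvStepA (pvFactsOf b, cf) ln = (pvFactsOf b, cf) := by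
                simp only [pvStepA]
                rw [if_neg hc, if_neg he, if_neg hf, if_neg (by simp [hsep, hz])]
              have eF : pvFlush b f = b := by subst hfn; simp [pvFlush]
              rw [eA, eS, eF]
              exact ih b cf (none, none, none) ⟨hfn ▸ h1, hfn ▸ h2, hfn ▸ h3, by simp [hz]⟩
            · have hfn : ¬ (f.1 = none ∧ f.2.1 = none ∧ f.2.2 = none) := by
                rintro ⟨a1, a2, a3⟩
                exact hz (h4.mpr (by rcases f with ⟨x, y, z⟩; simp_all))
              have eA : pvStepA (pvFactsOf b, cf) ln =
                  ((if (pvFactsOf b).contains (cf.getD "category" "character") then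
                      (pvFactsOf b).modify (cf.getD "category" "character") []
                        (· ++ [[("entity", cf.get? "entity"), ("fact", cf.get? "fact")]])
                    else pvFactsOf b), PySem.Dict.empty) := by
                simp only [pvStepA]
                rw [if_neg hc, if_neg he, if_neg hf, if_pos (by rw [hsep]; simp [hz])]
              have hkey : cf.getD "category" "character" = f.1.getD "character" := by
                rw [PySem.Dict.getD_eq_get?_getD, h1]
              have hfacts :
                  (if (pvFactsOf b).contains (cf.getD "category" "character") then
                      (pvFactsOf b).modify (cf.getD "category" "character") []
                        (· ++ [[("entity", cf.get? "entity"), ("fact", cf.get? "fact")]])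
                    else pvFactsOf b) = pvFactsOf (pvFlush b f) := by
                rw [hkey, h2, h3]
                by_cases k1 : f.1.getD "character" = "character"
                · simp [pvFactsOf, pvFlush, hfn, k1, PySem.Dict.modify, PySem.Dict.insert,
                    PySem.Dict.getD, PySem.Dict.get?, PySem.Dict.contains]
                · by_cases k2 : f.1.getD "character" = "location"
                  · simp [pvFactsOf, pvFlush, hfn, k2, PySem.Dict.modify, PySem.Dict.insert,
                      PySem.Dict.getD, PySem.Dict.get?, PySem.Dict.contains]
                  · by_cases k3 : f.1.getD "character" = "item"
                    · simp [pvFactsOf, pvFlush, hfn, k3, PySem.Dict.modify, PySem.Dict.insert,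
                        PySem.Dict.getD, PySem.Dict.get?, PySem.Dict.contains]
                    · by_cases k4 : f.1.getD "character" = "relationship"
                      · simp [pvFactsOf, pvFlush, hfn, k4, PySem.Dict.modify,
                          PySem.Dict.insert, PySem.Dict.getD, PySem.Dict.get?, PySem.Dict.contains]
                      · have hcont : (pvFactsOf b).contains (f.1.getD "character") = false := by
                          have n1 : ¬ ("character" = f.1.getD "character") := fun h => k1 h.symm
                          have n2 : ¬ ("location" = f.1.getD "character") := fun h => k2 h.symm
                          have n3 : ¬ ("item" = f.1.getD "character") := fun h => k3 h.symm
                          have n4 : ¬ ("relationship" = f.1.getD "character") := fun h => k4 h.symm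
                          simp [pvFactsOf, PySem.Dict.contains, n1, n2, n3, n4]
                        rw [if_neg (by simp [hcont])]
                        simp [pvFlush, hfn, k1, k2, k3, k4]
              rw [eA, eS, hfacts]
              exact ih (pvFlush b f) PySem.Dict.empty (none, none, none)
                ⟨by simp [PySem.Dict.get?, PySem.Dict.empty], by simp [PySem.Dict.get?, PySem.Dict.empty],
                 by simp [PySem.Dict.get?, PySem.Dict.empty], by simp [PySem.Dict.size, PySem.Dict.empty]⟩
          · have hsep' : (PySem.Str.strip ln == "---") = false := by
              simpa using hsep
            have eA : pvStepA (pvFactsOf b, cf) ln = (pvFactsOf b, cf) := by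
              simp only [pvStepA]
              rw [if_neg hc, if_neg he, if_neg hf, if_neg (by simp [hsep'])]
            have eS : pvSpecRun (PySem.Str.strip ln :: rest.map PySem.Str.strip) b f =
                pvSpecRun (rest.map PySem.Str.strip) b (pvUpdF f (PySem.Str.strip ln)) := by
              simp only [pvSpecRun]; rw [if_neg hsep]
            have eU : pvUpdF f (PySem.Str.strip ln) = f := by
              simp only [pvUpdF]; rw [if_neg hc, if_neg he, if_neg hf]
            rw [eA, eS, eU]
            exact ih b cf f ⟨h1, h2, h3, h4⟩

lemma pvB_run (l : List String) :
    ∀ (recs : List (List String)) (buf : List String) b,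
      ((l.foldl pvSplitStep (recs, buf)).1).foldl pvBucket b
      = pvSpecRun (l.map PySem.Str.strip) (recs.foldl pvBucket b)
          (buf.foldl pvUpdF (none, none, none)) := by
  induction l with
  | nil => intro recs buf b; rfl
  | cons ln rest ih =>
    intro recs buf b
    simp only [List.foldl_cons, List.map_cons]
    by_cases hsep : (PySem.Str.strip ln == "---") = true
    · have e1 : pvSplitStep (recs, buf) ln = (recs ++ [buf], []) := by
        simp only [pvSplitStep]; rw [if_pos hsep]
      have eS : pvSpecRun (PySem.Str.strip ln :: rest.map PySem.Str.strip)
            (recs.foldl pvBucket b) (buf.foldl pvUpdF (none, none, none))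
          = pvSpecRun (rest.map PySem.Str.strip)
              (pvFlush (recs.foldl pvBucket b) (buf.foldl pvUpdF (none, none, none)))
              (none, none, none) := by
        simp only [pvSpecRun]; rw [if_pos hsep]
      rw [e1, ih (recs ++ [buf]) [] b, List.foldl_append, eS]
      rfl
    · have e1 : pvSplitStep (recs, buf) ln = (recs, buf ++ [PySem.Str.strip ln]) := by
        simp only [pvSplitStep]; rw [if_neg hsep]
      have eS : pvSpecRun (PySem.Str.strip ln :: rest.map PySem.Str.strip)
            (recs.foldl pvBucket b) (buf.foldl pvUpdF (none, none, none))
          = pvSpecRun (rest.map PySem.Str.strip) (recs.foldl pvBucket b)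
              (pvUpdF (buf.foldl pvUpdF (none, none, none)) (PySem.Str.strip ln)) := by
        simp only [pvSpecRun]; rw [if_neg hsep]
      rw [e1, ih recs (buf ++ [PySem.Str.strip ln]) b, List.foldl_append, eS]
      rfl

-- ===== VERDICT (by name: the statement is the Claim_ definition above) =====
set_option maxHeartbeats 1600000 in
theorem parse_extracted_facts_py_spec : Claim_equal_parse_extracted_facts_py := by
  intro response _
  unfold Spec_parse_extracted_facts_py parse_extracted_facts_py parse_extracted_facts_py_alt
  have hR0 : pvR PySem.Dict.empty (none, none, none) :=
    ⟨by simp [PySem.Dict.get?, PySem.Dict.empty], by simp [PySem.Dict.get?, PySem.Dict.empty],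
     by simp [PySem.Dict.get?, PySem.Dict.empty], by simp [PySem.Dict.size, PySem.Dict.empty]⟩
  show ((((PySem.Str.split? (PySem.Str.strip response) "\n").getD []).foldl pvStepA
      (PySem.Dict.ofList [("character", []), ("location", []), ("item", []), ("relationship", [])],
        PySem.Dict.empty)).1).items
    = [("character",
          (((((PySem.Str.split? (PySem.Str.strip response) "\n").getD []).foldl pvSplitStep
              ([], [])).1).foldl pvBucket ([], [], [], [])).1),
       ("location",
          (((((PySem.Str.split? (PySem.Str.strip response) "\n").getD []).foldl pvSplitStep
              ([], [])).1).foldl pvBucket ([], [], [], [])).2.1),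
       ("item",
          (((((PySem.Str.split? (PySem.Str.strip response) "\n").getD []).foldl pvSplitStep
              ([], [])).1).foldl pvBucket ([], [], [], [])).2.2.1),
       ("relationship",
          (((((PySem.Str.split? (PySem.Str.strip response) "\n").getD []).foldl pvSplitStep
              ([], [])).1).foldl pvBucket ([], [], [], [])).2.2.2)]
  rw [show (PySem.Dict.ofList [("character", ([] : List (List (String × Option String)))),
        ("location", []), ("item", []), ("relationship", [])]
      = pvFactsOf ([], [], [], [])) from rfl]
  rw [pvA_run ((PySem.Str.split? (PySem.Str.strip response) "\n").getD [])
        ([], [], [], []) PySem.Dict.empty (none, none, none) hR0]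
  rw [pvB_run ((PySem.Str.split? (PySem.Str.strip response) "\n").getD []) [] [] ([], [], [], [])]
  simp only [pvFactsOf, List.foldl_nil]
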